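-- pv_equiv track=rewrite | github.com/ykroitoro/AUTODFSMAILER | DFS_MASTER_LIST_CLOUD_(1).py | sanitize_sheet_title
-- ===== SOURCE A (Python) =====
-- def sanitize_sheet_title(title):
--     if not isinstance(title, str):
--         title = str(title) if title is not None else "Unnamed"
--     title = title.strip()
--     title = title[:31]
--     for c in ['\\', '/', '*', '[', ']', ':', '?']:
--         title = title.replace(c, '')
--     return title or "Unnamed"
-- ===== SOURCE B (Python) =====
-- FORBIDDEN = set('\\/*[]:?')
--
-- def sanitize_sheet_title(title):
--     if not isinstance(title, str):
--         title = str(title) if title is not None else "Unnamed"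
--     title = ''.join(c for c in title.strip()[:31] if c not in FORBIDDEN)
--     return title or "Unnamed"
-- ===== Notes on version B (the rewrite author's own statement) =====
-- stated objective: simpler
-- what changed: Replaces the seven sequential str.replace whole-string scans with a single character-filter pass over the truncated title using a forbidden-character set.
import Mathlib
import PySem

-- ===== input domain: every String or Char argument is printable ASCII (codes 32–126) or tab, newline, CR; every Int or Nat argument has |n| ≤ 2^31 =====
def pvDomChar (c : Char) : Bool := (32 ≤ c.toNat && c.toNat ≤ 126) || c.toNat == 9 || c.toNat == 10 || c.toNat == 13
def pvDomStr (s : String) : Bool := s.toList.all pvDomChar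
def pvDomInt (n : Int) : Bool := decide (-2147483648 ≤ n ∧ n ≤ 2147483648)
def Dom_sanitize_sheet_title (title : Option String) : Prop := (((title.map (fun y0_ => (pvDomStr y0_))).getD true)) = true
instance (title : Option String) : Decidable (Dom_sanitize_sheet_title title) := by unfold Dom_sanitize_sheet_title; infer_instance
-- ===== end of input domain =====

-- B replaces A's seven sequential .replace scans by one character-filter pass (objective: simpler).
-- ===== PORT A =====
def sanitize_sheet_title (title : Option String) : String :=
  let t0 : String := match title with
    | none => "Unnamed"          -- title is None → "Unnamed"
    | some s => s                -- already a str
  let t1 := PySem.Str.strip t0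
  let t2 := PySem.Str.slice t1 none (some 31)
  let t3 := ["\\", "/", "*", "[", "]", ":", "?"].foldl
    (fun t c => PySem.Str.replace t c "") t2
  if t3 = "" then "Unnamed" else t3

-- ===== PORT B =====
def pvForbidden : List Char := ['\\', '/', '*', '[', ']', ':', '?']

def sanitize_sheet_title_alt (title : Option String) : String :=
  let t0 : String := match title with
    | none => "Unnamed"
    | some s => s
  let t1 := String.ofList
    ((PySem.Str.slice (PySem.Str.strip t0) none (some 31)).toList.filter
      (fun c => !pvForbidden.contains c))
  if t1 = "" then "Unnamed" else t1

-- ===== PRECONDITION & SPEC =====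
def Spec_sanitize_sheet_title (title : Option String) (out : String) : Prop := out = sanitize_sheet_title_alt title
instance (title : Option String) (out : String) : Decidable (Spec_sanitize_sheet_title title out) := by unfold Spec_sanitize_sheet_title; infer_instance

-- ===== CLAIM (what is proved, stated in full; the proofs are below) =====
def Claim_equal_sanitize_sheet_title : Prop := ∀ (title : Option String), Dom_sanitize_sheet_title title → Spec_sanitize_sheet_title title (sanitize_sheet_title title)

-- ===== LEMMAS AND PROOFS =====
theorem go_filter (c : Char) : ∀ (fuel : Nat) (l acc : List Char), l.length ≤ fuel →
    PySem.Chars.replace.go [c] [] fuel l acc = acc.reverse ++ l.filter (fun a => a != c) := by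
  intro fuel
  induction fuel with
  | zero => intro l acc h; cases l with
    | nil => simp [PySem.Chars.replace.go]
    | cons a t => simp at h
  | succ n ih =>
    intro l acc h
    cases l with
    | nil => simp [PySem.Chars.replace.go]
    | cons a t =>
      rw [PySem.Chars.replace.go]
      by_cases hc : a = c
      · subst hc
        simp [List.isPrefixOf, ih t acc (by simpa using h)]
      · have : [c].isPrefixOf (a :: t) = false := by
          simp [List.isPrefixOf]; exact fun h' => (hc h'.symm).elim
        simp [this, ih t (a :: acc) (by simpa using h), hc]

theorem replace_one_char (c : Char) (l : List Char) :
    PySem.Chars.replace l [c] [] = l.filter (fun a => a != c) := by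
  rw [PySem.Chars.replace]
  simp [go_filter c l.length l [] (le_refl _)]

theorem str_replace_one (o : String) (c : Char) (h : o.toList = [c]) (s : String) :
    PySem.Str.replace s o "" =
      String.ofList (s.toList.filter (fun a => a != c)) := by
  rw [PySem.Str.replace]
  simp [h, replace_one_char]

theorem fold_replace_eq_filter (s : String) :
    ["\\", "/", "*", "[", "]", ":", "?"].foldl (fun t c => PySem.Str.replace t c "") s =
      String.ofList (s.toList.filter (fun c => !pvForbidden.contains c)) := by
  show List.foldl _ _ _ = _
  rw [List.foldl_cons, List.foldl_cons, List.foldl_cons, List.foldl_cons,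
      List.foldl_cons, List.foldl_cons, List.foldl_cons, List.foldl_nil]
  rw [str_replace_one "\\" '\\' (by decide), str_replace_one "/" '/' (by decide),
      str_replace_one "*" '*' (by decide), str_replace_one "[" '[' (by decide),
      str_replace_one "]" ']' (by decide), str_replace_one ":" ':' (by decide),
      str_replace_one "?" '?' (by decide)]
  simp only [String.toList_ofList, List.filter_filter]
  congr 1
  apply List.filter_congr
  intro c _
  simp only [pvForbidden, List.contains_cons, List.contains_nil, Bool.or_false,
    Bool.not_or, bne]
  ac_rfl

-- ===== VERDICT (by name: the statement is the Claim_ definition above) =====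
theorem sanitize_sheet_title_spec : Claim_equal_sanitize_sheet_title := by
  intro title _
  unfold Spec_sanitize_sheet_title sanitize_sheet_title sanitize_sheet_title_alt
  cases title <;> simp only [fold_replace_eq_filter]
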